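-- pv_equiv track=rewrite | github.com/LingDong-/ci-ren | ci.py | getstruct
-- ===== SOURCE A (Python) =====
-- def getstruct(pai: str):
--     a = (
--         pai.replace(",", "$")
--         .replace(".", "$")
--         .replace("`", "$")
--         .replace("|", "")
--         .replace("*", "")
--     )
--     b = a.split("$")[:-1]
--     return [len(b[i]) for i in range(len(b))]
-- ===== SOURCE B (Python) =====
-- def getstruct(pai: str):
--     # One left-to-right scan with a run-length counter.  A rewrites ',', '.', '`'
--     # to '$' and splits on '$', so a literal '$' in the input splits too; we keep
--     # it in the delimiter set to match A exactly.  '|' and '*' are skipped, and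
--     # the pending tail after the last delimiter is dropped (A's split(...)[:-1]).
--     out = []
--     n = 0
--     for ch in pai:
--         if ch in ",.`$":
--             out.append(n)
--             n = 0
--         elif ch not in "|*":
--             n += 1
--     return out
-- ===== Notes on version B (the rewrite author's own statement) =====
-- stated objective: alternative
-- what changed: Replaced the five full-string replace passes plus split plus indexed comprehension by a single left-to-right counter scan (the delimiter set includes '$', A's split marker, so behaviour is identical); one pass and no intermediate strings, though A's C-implemented str methods remain faster in CPython.
import Mathlib
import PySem

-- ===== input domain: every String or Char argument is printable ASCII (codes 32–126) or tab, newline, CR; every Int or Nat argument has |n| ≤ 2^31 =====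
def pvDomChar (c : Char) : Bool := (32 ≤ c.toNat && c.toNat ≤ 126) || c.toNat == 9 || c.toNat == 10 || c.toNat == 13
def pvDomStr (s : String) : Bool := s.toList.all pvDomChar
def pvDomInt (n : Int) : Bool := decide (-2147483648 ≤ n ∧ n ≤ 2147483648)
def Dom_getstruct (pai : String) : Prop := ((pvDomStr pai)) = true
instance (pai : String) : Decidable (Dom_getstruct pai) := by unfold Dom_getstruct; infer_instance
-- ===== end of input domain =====

-- B replaces A's five replace passes + split + indexed comprehension by one
-- counter scan (same values; a literal '$' splits in A, so B's delimiter set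
-- keeps it); equivalence is proved for all strings.

-- ===== PORT A =====
def getstruct (pai : String) : List Int :=
  let a := PySem.Str.replace (PySem.Str.replace (PySem.Str.replace
             (PySem.Str.replace (PySem.Str.replace pai "," "$") "." "$")
             "`" "$") "|" "") "*" ""
  -- a.split("$"): the separator is the nonempty literal "$", so split? is some; getD is exact
  let b := PySem.List.slice ((PySem.Str.split? a "$").getD []) none (some (-1))
  (PySem.List.pyRange 0 (PySem.List.len b) 1).map (fun i => PySem.Str.len (PySem.List.pyGetD b i ""))

-- ===== PORT B =====
-- B-side helper: one step of the scan ('ch in ",.`$"' / 'ch not in "|*"' as disjunctions)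
def stepB (st : List Int × Int) (ch : Char) : List Int × Int :=
  if ch = ',' ∨ ch = '.' ∨ ch = '`' ∨ ch = '$' then (st.1 ++ [st.2], 0)
  else if ch = '|' ∨ ch = '*' then st
  else (st.1, st.2 + 1)

def getstruct_alt (pai : String) : List Int :=
  (pai.toList.foldl stepB ([], 0)).1

-- ===== PRECONDITION & SPEC =====
def Spec_getstruct (pai : String) (out : List Int) : Prop := out = getstruct_alt pai
instance (pai : String) (out : List Int) : Decidable (Spec_getstruct pai out) := by unfold Spec_getstruct; infer_instance

-- ===== CLAIM (what is proved, stated in full; the proofs are below) =====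
def Claim_equal_getstruct : Prop := ∀ (pai : String), Dom_getstruct pai → Spec_getstruct pai (getstruct pai)

-- ===== LEMMAS AND PROOFS =====

-- the combined per-character effect of A's five replace passes
def substTotal (c : Char) : List Char :=
  if c = ',' ∨ c = '.' ∨ c = '`' then ['$']
  else if c = '|' ∨ c = '*' then []
  else [c]

-- reference recursion both ports are reduced to
def gRec : List Char → Int → List Int
  | [], _ => []
  | c :: t, n =>
    if c = ',' ∨ c = '.' ∨ c = '`' ∨ c = '$' then n :: gRec t 0
    else if c = '|' ∨ c = '*' then gRec t n
    else gRec t (n + 1)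

-- reference form of Chars.splitOn for a one-character separator
def splitAux : List Char → List Char → List (List Char)
  | [], cur => [cur.reverse]
  | c :: t, cur => if c = '$' then cur.reverse :: splitAux t [] else splitAux t (c :: cur)

-- ---- B side ----
theorem foldB_eq (s : List Char) : ∀ (res : List Int) (n : Int),
    (s.foldl stepB (res, n)).1 = res ++ gRec s n := by
  induction s with
  | nil => intro res n; simp [gRec]
  | cons c t ih =>
    intro res n
    by_cases h1 : c = ',' ∨ c = '.' ∨ c = '`' ∨ c = '$'
    · simp [stepB, h1, gRec, ih]
    · by_cases h2 : c = '|' ∨ c = '*'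
      · simp [stepB, h1, h2, gRec, ih]
      · simp [stepB, h1, h2, gRec, ih]

theorem alt_eq_gRec (pai : String) : getstruct_alt pai = gRec pai.toList 0 := by
  simpa [getstruct_alt] using foldB_eq pai.toList [] 0

-- ---- A side: single-character replace is a flatMap ----
theorem replace_go_single (x : Char) (bs : List Char) :
    ∀ (fuel : Nat) (l acc : List Char), l.length ≤ fuel →
      PySem.Chars.replace.go [x] bs fuel l acc
        = acc.reverse ++ l.flatMap (fun c => if c = x then bs else [c]) := by
  intro fuel
  induction fuel with
  | zero =>
    intro l acc h
    have : l = [] := List.length_eq_zero_iff.mp (Nat.le_zero.mp h)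
    subst this; simp [PySem.Chars.replace.go]
  | succ k ih =>
    intro l acc h
    cases l with
    | nil => simp [PySem.Chars.replace.go]
    | cons c t =>
      by_cases hc : c = x
      · subst hc
        have : List.isPrefixOf [c] (c :: t) = true := by simp [List.isPrefixOf]
        simp only [PySem.Chars.replace.go, this, if_pos]
        rw [ih _ _ (by simpa using Nat.le_of_succ_le_succ h)]
        simp
      · have : List.isPrefixOf [x] (c :: t) = false := by
          simp [List.isPrefixOf]; exact fun h' => (hc h'.symm).elim
        simp only [PySem.Chars.replace.go, this, Bool.false_eq_true, if_false]
        rw [ih _ _ (by simpa using Nat.le_of_succ_le_succ h)]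
        simp [hc]

theorem replace_single (s : List Char) (x : Char) (bs : List Char) :
    PySem.Chars.replace s [x] bs = s.flatMap (fun c => if c = x then bs else [c]) := by
  simpa [PySem.Chars.replace] using replace_go_single x bs s.length s [] le_rfl

-- ---- A side: splitOn for the one-character separator '$' ----
theorem splitOn_go_dollar :
    ∀ (fuel : Nat) (l cur : List Char) (acc : List (List Char)), l.length ≤ fuel →
      PySem.Chars.splitOn.go ['$'] fuel l cur acc = acc.reverse ++ splitAux l cur := by
  intro fuel
  induction fuel with
  | zero =>
    intro l cur acc h
    have : l = [] := List.length_eq_zero_iff.mp (Nat.le_zero.mp h)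
    subst this; simp [PySem.Chars.splitOn.go, splitAux]
  | succ k ih =>
    intro l cur acc h
    cases l with
    | nil => simp [PySem.Chars.splitOn.go, splitAux]
    | cons c t =>
      by_cases hc : c = '$'
      · subst hc
        have : List.isPrefixOf ['$'] ('$' :: t) = true := by simp [List.isPrefixOf]
        simp only [PySem.Chars.splitOn.go, this, if_pos]
        rw [ih _ _ _ (by simpa using Nat.le_of_succ_le_succ h)]
        simp [splitAux]
      · have : List.isPrefixOf ['$'] (c :: t) = false := by
          simp [List.isPrefixOf]; exact fun h' => (hc h'.symm).elim
        simp only [PySem.Chars.splitOn.go, this, Bool.false_eq_true, if_false]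
        rw [ih _ _ _ (by simpa using Nat.le_of_succ_le_succ h)]
        simp [splitAux, hc]

theorem splitOn_dollar (l : List Char) :
    PySem.Chars.splitOn l ['$'] = splitAux l [] := by
  simpa [PySem.Chars.splitOn] using
    splitOn_go_dollar (l.length + 1) l [] [] (Nat.le_succ _)

-- ---- the composite of the five replaces is flatMap substTotal ----
theorem subst_point (c : Char) :
    List.flatMap (fun x =>
      List.flatMap (fun x =>
        List.flatMap (fun x =>
          List.flatMap (fun y => if y = '*' then ([] : List Char) else [y])
            (if x = '|' then ([] : List Char) else [x]))
          (if x = '`' then ['$'] else [x]))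
        (if x = '.' then ['$'] else [x]))
      (if c = ',' then ['$'] else [c]) = substTotal c := by
  by_cases h1 : c = ',' ; · subst h1; decide
  by_cases h2 : c = '.' ; · subst h2; decide
  by_cases h3 : c = '`' ; · subst h3; decide
  by_cases h4 : c = '|' ; · subst h4; decide
  by_cases h5 : c = '*' ; · subst h5; decide
  simp [substTotal, h1, h2, h3, h4, h5]

theorem chain_eq (s : List Char) :
    PySem.Chars.replace (PySem.Chars.replace (PySem.Chars.replace
        (PySem.Chars.replace (PySem.Chars.replace s [','] ['$']) ['.'] ['$'])
        ['`'] ['$']) ['|'] []) ['*'] []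
      = s.flatMap substTotal := by
  rw [replace_single, replace_single, replace_single, replace_single, replace_single]
  rw [List.flatMap_assoc, List.flatMap_assoc, List.flatMap_assoc, List.flatMap_assoc]
  exact List.flatMap_congr (fun c _ => subst_point c)

-- ---- splitAux never returns [] ----
theorem splitAux_ne_nil (l : List Char) : ∀ cur, splitAux l cur ≠ [] := by
  induction l with
  | nil => intro cur; simp [splitAux]
  | cons c t ih =>
    intro cur
    by_cases hc : c = '$'
    · simp [splitAux, hc]
    · simpa [splitAux, hc] using ih (c :: cur)

-- ---- main A-side characterisation ----
theorem main_split (s : List Char) : ∀ (cur : List Char),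
    ((splitAux (s.flatMap substTotal) cur).dropLast).map (fun t => (t.length : Int))
      = gRec s (cur.length : Int) := by
  induction s with
  | nil => intro cur; simp [splitAux, gRec]
  | cons c t ih =>
    intro cur
    by_cases hd : c = ',' ∨ c = '.' ∨ c = '`' ∨ c = '$'
    · have hsub : substTotal c = ['$'] := by
        rcases hd with h | h | h | h <;> subst h <;> rfl
      have h0 : (List.map (fun t => (t.length : Int))
          ((splitAux (t.flatMap substTotal) []).dropLast)) = gRec t 0 := by
        simpa using ih []
      rw [List.flatMap_cons, hsub, List.singleton_append]
      rw [show splitAux ('$' :: List.flatMap substTotal t) cur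
            = cur.reverse :: splitAux (List.flatMap substTotal t) [] from by
          simp [splitAux]]
      rw [List.dropLast_cons_of_ne_nil (splitAux_ne_nil _ _), List.map_cons]
      rw [show gRec (c :: t) (cur.length : Int) = (cur.length : Int) :: gRec t 0 from by
          simp [gRec, hd]]
      simp [h0]
    · by_cases h2 : c = '|' ∨ c = '*'
      · have hsub : substTotal c = [] := by rcases h2 with h | h <;> subst h <;> rfl
        rw [List.flatMap_cons, hsub, List.nil_append]
        rw [show gRec (c :: t) (cur.length : Int) = gRec t (cur.length : Int) from by
            simp [gRec, hd, h2]]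
        exact ih cur
      · have h1 : ¬ (c = ',' ∨ c = '.' ∨ c = '`') := fun h => hd (by tauto)
        have hc : c ≠ '$' := fun h => hd (by tauto)
        have hsub : substTotal c = [c] := by simp [substTotal, h1, h2]
        rw [List.flatMap_cons, hsub, List.singleton_append]
        rw [show splitAux (c :: List.flatMap substTotal t) cur
              = splitAux (List.flatMap substTotal t) (c :: cur) from by
            simp [splitAux, hc]]
        rw [show gRec (c :: t) (cur.length : Int) = gRec t ((cur.length : Int) + 1) from by
            simp [gRec, hd, h2]]
        have := ih (c :: cur)
        simpa [Int.add_comm] using this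

-- ---- the indexed comprehension is a map ----
theorem comprehension_map (b : List String) :
    (PySem.List.pyRange 0 (PySem.List.len b) 1).map
        (fun i => PySem.Str.len (PySem.List.pyGetD b i ""))
      = b.map PySem.Str.len := by
  have h := PySem.List.map_pyGetD_pyRange_zero (xs := b) (d := "")
  calc (PySem.List.pyRange 0 (PySem.List.len b) 1).map
          (fun i => PySem.Str.len (PySem.List.pyGetD b i ""))
      = ((PySem.List.pyRange 0 (PySem.List.len b) 1).map
          (fun i => PySem.List.pyGetD b i "")).map PySem.Str.len := by rw [List.map_map]; rfl
    _ = b.map PySem.Str.len := by rw [h]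

-- ---- assembling A ----
theorem getstruct_eq_gRec (pai : String) : getstruct pai = gRec pai.toList 0 := by
  show (PySem.List.pyRange 0 (PySem.List.len _) 1).map _ = _
  rw [comprehension_map]
  have ha : (PySem.Str.replace (PySem.Str.replace (PySem.Str.replace
      (PySem.Str.replace (PySem.Str.replace pai "," "$") "." "$")
      "`" "$") "|" "") "*" "").toList = pai.toList.flatMap substTotal := by
    simp only [PySem.Str.toList_replace]
    exact chain_eq pai.toList
  rw [PySem.Str.split?]
  have hsep : PySem.Chars.split? (PySem.Str.replace (PySem.Str.replace (PySem.Str.replace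
      (PySem.Str.replace (PySem.Str.replace pai "," "$") "." "$")
      "`" "$") "|" "") "*" "").toList ("$" : String).toList
      = some (splitAux (pai.toList.flatMap substTotal) []) := by
    rw [PySem.Chars.split?]
    simp only [show (("$" : String).toList) = ['$'] from rfl]
    rw [if_neg (by simp)]
    rw [ha, splitOn_dollar]
  rw [hsep]
  simp only [Option.map_some, Option.getD_some, PySem.List.slice_to_neg_one,
    ← List.map_dropLast, List.map_map]
  have : (PySem.Str.len ∘ String.ofList) = fun t : List Char => (t.length : Int) := by
    funext t; simp [PySem.Str.len]
  rw [this]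
  simpa using main_split pai.toList []

-- ===== VERDICT (by name: the statement is the Claim_ definition above) =====
theorem getstruct_spec : Claim_equal_getstruct := by
  intro pai _
  show getstruct pai = getstruct_alt pai
  rw [getstruct_eq_gRec, alt_eq_gRec]
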